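-- pv_equiv track=rewrite | github.com/genetrus/MoneyMap | src/money_map/ui/guidance.py | _has_4_week_coverage
-- ===== SOURCE A (Python) =====
-- from typing import Any, MutableMapping
--
-- def _has_4_week_coverage(week_plan: Any) -> bool:
--     if not isinstance(week_plan, dict):
--         return False
--     if len(week_plan) < 4:
--         return False
--
--     covered_weeks: set[int] = set()
--     for key in week_plan:
--         week_num = _parse_week_number(str(key))
--         if week_num is not None and 1 <= week_num <= 4:
--             covered_weeks.add(week_num)
--     return covered_weeks == {1, 2, 3, 4}
--
-- def _parse_week_number(raw_key: str) -> int | None: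
--     digits = "".join(ch for ch in raw_key if ch.isdigit())
--     if not digits:
--         return None
--     try:
--         return int(digits)
--     except ValueError:
--         return None
-- ===== SOURCE B (Python) =====
-- def _parse_week_number(raw_key):
--     digits = "".join(ch for ch in raw_key if ch.isdigit())
--     if not digits:
--         return None
--     try:
--         return int(digits)
--     except ValueError:
--         return None
--
--
-- def _has_4_week_coverage(week_plan):
--     if not isinstance(week_plan, dict):
--         return False
--     return all(
--         any(_parse_week_number(str(k)) == w for k in week_plan)
--         for w in (1, 2, 3, 4)
--     )
-- ===== Notes on version B (the rewrite author's own statement) =====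
-- stated objective: simpler
-- what changed: Instead of accumulating a set of covered weeks in one pass over the keys and comparing it to {1,2,3,4} (with a len<4 early return), B loops over the four target weeks and scans the keys for each, returning all/any; the redundant len check is dropped.
import Mathlib
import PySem

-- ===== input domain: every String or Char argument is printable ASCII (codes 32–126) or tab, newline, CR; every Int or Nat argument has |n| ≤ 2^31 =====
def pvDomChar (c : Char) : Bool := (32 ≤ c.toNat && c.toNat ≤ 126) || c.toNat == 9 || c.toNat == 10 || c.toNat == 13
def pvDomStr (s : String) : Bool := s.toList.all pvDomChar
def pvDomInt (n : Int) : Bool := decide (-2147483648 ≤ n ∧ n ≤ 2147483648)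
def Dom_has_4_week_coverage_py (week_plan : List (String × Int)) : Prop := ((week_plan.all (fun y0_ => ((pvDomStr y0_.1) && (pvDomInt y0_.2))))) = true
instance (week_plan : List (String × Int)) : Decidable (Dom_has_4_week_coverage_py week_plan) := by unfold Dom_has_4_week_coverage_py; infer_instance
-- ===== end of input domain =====

-- B replaces A's one-pass covered-set accumulation + set comparison (and the redundant len<4
-- early return) with an all/any scan: for each target week 1..4, scan the keys for a match. Objective: simpler.


-- ===== PORT A =====
-- _parse_week_number: keep the digit characters, int(...) of them if nonempty, else None
-- (exact on the ASCII domain: Char.isDigit = str.isdigit there; int(digits) = PySem.Int.ofChars?,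
--  whose none case is Python's ValueError branch)
def pvParseWeek (raw_key : String) : Option Int :=
  let digits := raw_key.toList.filter (fun ch => ch.isDigit)
  if digits = [] then none else PySem.Int.ofChars? digits

-- 'len(week_plan)' / 'for key in week_plan' see the dict's DISTINCT keys in insertion order,
-- hence PySem.List.dedup of the association list's keys; str(key) on a string key is the key.
def has_4_week_coverage_py (week_plan : List (String × Int)) : Bool :=
  if (PySem.List.dedup (week_plan.map Prod.fst)).length < 4 then false
  else
    PySem.Set.equal
      ((PySem.List.dedup (week_plan.map Prod.fst)).foldl (fun s key =>
        match pvParseWeek key with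
        | some week_num => if 1 ≤ week_num ∧ week_num ≤ 4 then PySem.Set.add s week_num else s
        | none => s) PySem.Set.empty)
      (PySem.Set.ofList [1, 2, 3, 4])

-- ===== PORT B =====
-- all(any(_parse_week_number(str(k)) == w for k in week_plan) for w in (1, 2, 3, 4))
-- ('any' is insensitive to key duplication/order, so iterating the raw key list is exact)
def has_4_week_coverage_py_alt (week_plan : List (String × Int)) : Bool :=
  [(1 : Int), 2, 3, 4].all (fun w =>
    (week_plan.map Prod.fst).any (fun k => pvParseWeek k == some w))

-- ===== PRECONDITION & SPEC =====
def Spec_has_4_week_coverage_py (week_plan : List (String × Int)) (out : Bool) : Prop := out = has_4_week_coverage_py_alt week_plan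
instance (week_plan : List (String × Int)) (out : Bool) : Decidable (Spec_has_4_week_coverage_py week_plan out) := by unfold Spec_has_4_week_coverage_py; infer_instance

-- ===== CLAIM (what is proved, stated in full; the proofs are below) =====
def Claim_equal_has_4_week_coverage_py : Prop := ∀ (week_plan : List (String × Int)), Dom_has_4_week_coverage_py week_plan → Spec_has_4_week_coverage_py week_plan (has_4_week_coverage_py week_plan)

-- ===== LEMMAS AND PROOFS =====

-- membership in A's accumulated covered set
theorem mem_covered (l : List String) (s : PySem.Set Int) (w : Int) :
    w ∈ l.foldl (fun s key =>
      match pvParseWeek key with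
      | some week_num => if 1 ≤ week_num ∧ week_num ≤ 4 then PySem.Set.add s week_num else s
      | none => s) s ↔
    w ∈ s ∨ ∃ k ∈ l, pvParseWeek k = some w ∧ 1 ≤ w ∧ w ≤ 4 := by
  induction l generalizing s with
  | nil => simp
  | cons x xs ih =>
    simp only [List.foldl_cons, ih, List.mem_cons]
    rcases h : pvParseWeek x with _ | n
    · constructor
      · rintro (h1 | ⟨k, hk, hp⟩)
        · exact Or.inl h1
        · exact Or.inr ⟨k, Or.inr hk, hp⟩
      · rintro (h1 | ⟨k, (rfl | hk), hp⟩)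
        · exact Or.inl h1
        · simp [h] at hp
        · exact Or.inr ⟨k, hk, hp⟩
    · by_cases hb : 1 ≤ n ∧ n ≤ 4
      · simp only [if_pos hb, PySem.Set.mem_add]
        constructor
        · rintro ((h1 | rfl) | ⟨k, hk, hp⟩)
          · exact Or.inl h1
          · exact Or.inr ⟨x, Or.inl rfl, h, hb⟩
          · exact Or.inr ⟨k, Or.inr hk, hp⟩
        · rintro (h1 | ⟨k, (rfl | hk), hp⟩)
          · exact Or.inl (Or.inl h1)
          · rw [h] at hp; exact Or.inl (Or.inr (Option.some_injective _ hp.1).symm)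
          · exact Or.inr ⟨k, hk, hp⟩
      · simp only [if_neg hb]
        constructor
        · rintro (h1 | ⟨k, hk, hp⟩)
          · exact Or.inl h1
          · exact Or.inr ⟨k, Or.inr hk, hp⟩
        · rintro (h1 | ⟨k, (rfl | hk), hp⟩)
          · exact Or.inl h1
          · rw [h] at hp; cases Option.some_injective _ hp.1; exact absurd ⟨hp.2.1, hp.2.2⟩ hb
          · exact Or.inr ⟨k, hk, hp⟩

-- B = true iff every week 1..4 is matched by some key
theorem alt_iff (week_plan : List (String × Int)) :
    has_4_week_coverage_py_alt week_plan = true ↔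
    ∀ w ∈ [(1 : Int), 2, 3, 4], ∃ k ∈ week_plan.map Prod.fst, pvParseWeek k = some w := by
  simp only [has_4_week_coverage_py_alt, List.all_eq_true, List.any_eq_true, beq_iff_eq]

theorem length_le_of_nodup_subset {α : Type} [DecidableEq α] {l1 l2 : List α}
    (h : l1.Nodup) (hs : l1 ⊆ l2) : l1.length ≤ l2.length :=
  calc l1.length = l1.toFinset.card := (List.toFinset_card_of_nodup h).symm
    _ ≤ l2.toFinset.card :=
      Finset.card_le_card (fun x hx => List.mem_toFinset.mpr (hs (List.mem_toFinset.mp hx)))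
    _ ≤ l2.length := l2.toFinset_card_le

-- if B holds, the (distinct) keys contain four distinct witnesses, so there are ≥ 4 keys
theorem four_le_keys (week_plan : List (String × Int))
    (hB : has_4_week_coverage_py_alt week_plan = true) :
    4 ≤ (PySem.List.dedup (week_plan.map Prod.fst)).length := by
  rw [alt_iff] at hB
  obtain ⟨k1, hk1, hp1⟩ := hB 1 (by simp)
  obtain ⟨k2, hk2, hp2⟩ := hB 2 (by simp)
  obtain ⟨k3, hk3, hp3⟩ := hB 3 (by simp)
  obtain ⟨k4, hk4, hp4⟩ := hB 4 (by simp)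
  have ne' : ∀ (a b : String) (m n : Int), pvParseWeek a = some m → pvParseWeek b = some n →
      m ≠ n → a ≠ b := by
    intro a b m n ha hb hmn rfl
    rw [ha] at hb
    exact hmn (Option.some_injective _ hb)
  have hsub : [k1, k2, k3, k4] ⊆ PySem.List.dedup (week_plan.map Prod.fst) := by
    intro x hx
    rw [PySem.List.mem_dedup]
    simp only [List.mem_cons, List.not_mem_nil, or_false] at hx
    rcases hx with rfl | rfl | rfl | rfl
    · exact hk1
    · exact hk2
    · exact hk3
    · exact hk4
  have hnd : ([k1, k2, k3, k4] : List String).Nodup := by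
    refine List.nodup_cons.mpr ⟨?_, List.nodup_cons.mpr ⟨?_,
      List.nodup_cons.mpr ⟨?_, List.nodup_singleton _⟩⟩⟩ <;>
      simp only [List.mem_cons, List.not_mem_nil, or_false, not_or]
    · exact ⟨ne' _ _ 1 2 hp1 hp2 (by decide), ne' _ _ 1 3 hp1 hp3 (by decide),
        ne' _ _ 1 4 hp1 hp4 (by decide)⟩
    · exact ⟨ne' _ _ 2 3 hp2 hp3 (by decide), ne' _ _ 2 4 hp2 hp4 (by decide)⟩
    · exact ne' _ _ 3 4 hp3 hp4 (by decide)
  exact length_le_of_nodup_subset hnd hsub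

-- ===== VERDICT (by name: the statement is the Claim_ definition above) =====
theorem has_4_week_coverage_py_spec : Claim_equal_has_4_week_coverage_py := by
  intro week_plan _
  unfold Spec_has_4_week_coverage_py has_4_week_coverage_py
  by_cases hlen : (PySem.List.dedup (week_plan.map Prod.fst)).length < 4
  · rw [if_pos hlen]
    cases hB : has_4_week_coverage_py_alt week_plan with
    | false => rfl
    | true => exact absurd (four_le_keys week_plan hB) (by omega)
  · rw [if_neg hlen, Bool.eq_iff_iff, PySem.Set.equal_iff, alt_iff]
    constructor
    · intro h w hw
      have hm : w ∈ PySem.Set.ofList [(1 : Int), 2, 3, 4] := by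
        rw [PySem.Set.mem_ofList]; exact hw
      have hc := (h w).2 hm
      rw [mem_covered] at hc
      rcases hc with h0 | ⟨k, hk, hp, _⟩
      · simp [PySem.Set.empty] at h0
      · exact ⟨k, (PySem.List.mem_dedup _ _).1 hk, hp⟩
    · intro h x
      rw [mem_covered, PySem.Set.mem_ofList]
      constructor
      · rintro (h0 | ⟨k, hk, hp, hb1, hb2⟩)
        · simp [PySem.Set.empty] at h0
        · simp only [List.mem_cons, List.not_mem_nil, or_false]; omega
      · intro hx
        have hb : 1 ≤ x ∧ x ≤ 4 := by
          simp only [List.mem_cons, List.not_mem_nil, or_false] at hx; omega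
        obtain ⟨k, hk, hp⟩ := h x hx
        exact Or.inr ⟨k, (PySem.List.mem_dedup _ _).2 hk, hp, hb⟩
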